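-- pv_equiv track=rewrite | github.com/lam268/python-coding-everyday | string-sorted.py | string_sorted
-- ===== SOURCE A (Python) =====
-- def is_num(num):
--     try:
--         int(num)
--         return True
--     except ValueError:
--         return False
--
-- def string_sorted(s):
--
-- 	s_sorted = sorted(s)
-- 	digit_index, str_index = 0, sum(1 for item in s if is_num(item))
--
-- 	for i in range(len(s)):
-- 		if is_num(s[i]):
-- 			s[i] = s_sorted[digit_index]
-- 			digit_index = digit_index + 1
-- 		else:
-- 			s[i] = s_sorted[str_index]
-- 			str_index = str_index + 1
--
-- 	return ' '.join(s)
-- ===== SOURCE B (Python) =====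
-- def is_num(num):
--     try:
--         int(num)
--         return True
--     except ValueError:
--         return False
--
-- def string_sorted(s):
--     # mutates s in place, like the original
--     s_sorted = sorted(s)
--     k = sum(map(is_num, s))
--     nums, others = s_sorted[:k], s_sorted[k:]
--     out = []
--     for x in reversed(s):
--         out.append(nums.pop() if is_num(x) else others.pop())
--     out.reverse()
--     s[:] = out
--     return ' '.join(s)
-- ===== Notes on version B (the rewrite author's own statement) =====
-- stated objective: alternative
-- what changed: B splits the sorted list into its numeric-count prefix and the remaining suffix, then traverses the original list back to front, popping each assigned value off the end of the matching stack and reversing the collected output, instead of A's forward indexed loop writing in place with two forward cursors into one sorted array.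
import Mathlib
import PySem

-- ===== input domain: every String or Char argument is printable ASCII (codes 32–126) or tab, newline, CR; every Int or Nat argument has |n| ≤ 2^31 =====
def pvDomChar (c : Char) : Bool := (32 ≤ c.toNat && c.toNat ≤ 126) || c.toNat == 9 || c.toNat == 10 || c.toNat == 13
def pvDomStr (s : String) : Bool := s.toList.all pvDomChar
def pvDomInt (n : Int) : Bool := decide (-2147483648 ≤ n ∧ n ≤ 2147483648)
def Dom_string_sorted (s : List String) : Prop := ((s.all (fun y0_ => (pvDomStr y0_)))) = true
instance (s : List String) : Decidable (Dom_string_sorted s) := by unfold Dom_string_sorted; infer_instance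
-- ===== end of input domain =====

-- B traverses the original list BACK TO FRONT, popping each assigned value off the end of one of
-- two stacks (the numeric half and the rest of the sorted list), then reverses the output —
-- instead of A's forward indexed loop keeping two forward cursors into one sorted array
-- (objective: alternative decomposition, same cost). Python A and B both mutate the argument list
-- in place identically; the Lean equivalence is about the returned string.

-- ===== PORT A =====
def is_num (num : String) : Bool := (PySem.Int.ofStr? num).isSome

-- body of A's for-loop; state = (s, digit_index, str_index).  The index i comes from
-- range(len(s)) so it is nonnegative and in range: .toNat is exact and pyGet? never misses
-- (the .getD "" default is never used).
def stepA (t : List String) (st : List String × Nat × Nat) (i : Int) : List String × Nat × Nat :=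
  if is_num ((PySem.List.pyGet? st.1 i).getD "") then
    (st.1.set i.toNat ((PySem.List.pyGet? t ((st.2.1 : Int))).getD ""), st.2.1 + 1, st.2.2)
  else
    (st.1.set i.toNat ((PySem.List.pyGet? t ((st.2.2 : Int))).getD ""), st.2.1, st.2.2 + 1)

def string_sorted (s : List String) : String :=
  let s_sorted := PySem.List.sorted s (fun x => x) false
  let fin := (PySem.List.pyRange 0 (s.length : Int)).foldl (stepA s_sorted)
      (s, 0, s.countP (fun item => is_num item))
  PySem.Str.join " " fin.1

-- ===== PORT B =====
-- body of B's loop over reversed(s); state = (out, nums, others).  Each stack holds exactly as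
-- many elements as remain to be assigned of its kind, so pop? never misses; Python's list.pop()
-- would raise IndexError on an empty stack, which never happens, so the none-branch is unreachable.
def wstep (st : List String × List String × List String) (x : String) :
    List String × List String × List String :=
  if is_num x then
    match PySem.List.pop? st.2.1 with
    | some (v, rest) => (st.1 ++ [v], rest, st.2.2)
    | none => st
  else
    match PySem.List.pop? st.2.2 with
    | some (v, rest) => (st.1 ++ [v], st.2.1, rest)
    | none => st

def string_sorted_alt (s : List String) : String :=
  let s_sorted := PySem.List.sorted s (fun x => x) false
  -- k = sum(map(is_num, s))
  let k : Nat := (s.map is_num).foldl (fun acc b => acc + (if b then 1 else 0)) 0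
  let nums := PySem.List.slice s_sorted none (some (k : Int))
  let others := PySem.List.slice s_sorted (some (k : Int)) none
  let fin := (s.reverse).foldl wstep ([], nums, others)
  PySem.Str.join " " fin.1.reverse

-- ===== PRECONDITION & SPEC =====
def Spec_string_sorted (s : List String) (out : String) : Prop := out = string_sorted_alt s
instance (s : List String) (out : String) : Decidable (Spec_string_sorted s out) := by unfold Spec_string_sorted; infer_instance

-- ===== CLAIM =====
def Claim_equal_string_sorted : Prop := ∀ (s : List String), Dom_string_sorted s → Spec_string_sorted s (string_sorted s)

-- ===== LEMMAS AND PROOFS =====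

-- common shape of both results, A's view: walk the original list, handing out t[dn], t[dn+1], …
-- at the numeric slots and t[ds], t[ds+1], … at the non-numeric slots
def gbuild (t : List String) : Nat → Nat → List String → List String
  | _, _, [] => []
  | dn, ds, x :: r =>
    if is_num x then ((PySem.List.pyGet? t (dn : Int)).getD "") :: gbuild t (dn+1) ds r
    else ((PySem.List.pyGet? t (ds : Int)).getD "") :: gbuild t dn (ds+1) r

-- common shape, B's view: weave two streams, consuming each from the FRONT
def wf : List String → List String → List String → List String
  | _, _, [] => []
  | N, O, x :: r =>
    if is_num x then N.headD "" :: wf N.tail O r else O.headD "" :: wf N O.tail r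

-- A-side: shifting all loop indices by one skips the head of the current list
lemma shiftA (t : List String) :
    ∀ (idxs : List Nat) (y : String) (cur : List String) (di si : Nat),
    ((idxs.map (fun (i : Nat) => ((i + 1 : Nat) : Int))).foldl (stepA t) (y :: cur, di, si))
      = ((y :: ((idxs.map (fun (i : Nat) => (i : Int))).foldl (stepA t) (cur, di, si)).1),
         ((idxs.map (fun (i : Nat) => (i : Int))).foldl (stepA t) (cur, di, si)).2) := by
  intro idxs
  induction idxs with
  | nil => intro y cur di si; simp
  | cons i idxs ih =>
    intro y cur di si
    rw [List.map_cons, List.map_cons, List.foldl_cons, List.foldl_cons]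
    by_cases h : is_num ((cur[i]?).getD "")
    · have hA : stepA t (y :: cur, di, si) ((i + 1 : Nat) : Int)
          = (y :: (stepA t (cur, di, si) ((i : Nat) : Int)).1,
             (stepA t (cur, di, si) ((i : Nat) : Int)).2) := by
        simp [stepA, h]
      rw [hA]
      exact ih y _ _ _
    · have hA : stepA t (y :: cur, di, si) ((i + 1 : Nat) : Int)
          = (y :: (stepA t (cur, di, si) ((i : Nat) : Int)).1,
             (stepA t (cur, di, si) ((i : Nat) : Int)).2) := by
        simp [stepA, h]
      rw [hA]
      exact ih y _ _ _

lemma mainA (t : List String) :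
    ∀ (s : List String) (di si : Nat),
    ((List.range s.length).map (fun (i : Nat) => (i : Int))).foldl (stepA t) (s, di, si)
      = (gbuild t di si s, di + s.countP (fun x => is_num x),
         si + s.countP (fun x => !is_num x)) := by
  intro s
  induction s with
  | nil => intro di si; simp [gbuild]
  | cons x r ih =>
    intro di si
    rw [show (x :: r).length = r.length + 1 from rfl, List.range_succ_eq_map, List.map_cons,
      List.map_map, List.foldl_cons]
    have hmap : ((fun (i : Nat) => (i : Int)) ∘ Nat.succ) = fun (i : Nat) => ((i + 1 : Nat) : Int) := by
      funext i; simp [Nat.succ_eq_add_one]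
    rw [hmap]
    by_cases h : is_num x
    · have hstep : stepA t (x :: r, di, si) (((0 : Nat) : Int))
          = (((PySem.List.pyGet? t ((di : Nat) : Int)).getD "") :: r, di + 1, si) := by
        simp [stepA, h]
      rw [hstep, shiftA, ih]
      simp only [gbuild, List.countP_cons, Prod.ext_iff]
      refine ⟨by simp [h], by simp [h] <;> omega, by simp [h] <;> omega⟩
    · have hstep : stepA t (x :: r, di, si) (((0 : Nat) : Int))
          = (((PySem.List.pyGet? t ((si : Nat) : Int)).getD "") :: r, di, si + 1) := by
        simp [stepA, h]
      rw [hstep, shiftA, ih]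
      simp only [gbuild, List.countP_cons, Prod.ext_iff]
      refine ⟨by simp [h], by simp [h] <;> omega, by simp [h] <;> omega⟩

-- bridge: pyRange 0 len is the cast of List.range
lemma pyRange_eq_map (n : Nat) :
    PySem.List.pyRange 0 (n : Int) = (List.range n).map (fun (i : Nat) => (i : Int)) := by
  exact PySem.List.pyRange_zero_natCast n

-- B's k-sum is the numeric count
lemma ksum (s : List String) : ∀ (a : Nat),
    ((s.map is_num).foldl (fun acc b => acc + (if b then 1 else 0)) a)
      = a + s.countP (fun x => is_num x) := by
  induction s with
  | nil => intro a; simp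
  | cons x r ih =>
    intro a
    rw [List.map_cons, List.foldl_cons, ih, List.countP_cons]
    by_cases h : is_num x <;> simp [h] <;> omega

-- gbuild's index streams are the front-consuming streams of wf
lemma gbuild_eq_wf (t : List String) :
    ∀ (s : List String) (dn ds : Nat),
    gbuild t dn ds s = wf (t.drop dn) (t.drop ds) s := by
  intro s
  induction s with
  | nil => intro dn ds; simp [gbuild, wf]
  | cons x r ih =>
    intro dn ds
    by_cases h : is_num x
    · simp only [gbuild, wf, h, if_pos]
      congr 1
      · rw [PySem.List.pyGet?_natCast, List.headD_eq_head?_getD, List.head?_drop]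
      · rw [List.tail_drop, ih]
    · simp only [gbuild, wf, h, if_neg, Bool.false_eq_true, not_false_iff]
      congr 1
      · rw [PySem.List.pyGet?_natCast, List.headD_eq_head?_getD, List.head?_drop]
      · rw [List.tail_drop, ih]

-- wf never looks past the first (numeric count) elements of its first stream
lemma wf_extend :
    ∀ (s N M O : List String), s.countP (fun x => is_num x) ≤ N.length →
    wf (N ++ M) O s = wf N O s := by
  intro s
  induction s with
  | nil => intro N M O _; simp [wf]
  | cons x r ih =>
    intro N M O hN
    by_cases h : is_num x
    · rw [List.countP_cons] at hN
      simp only [h, if_pos] at hN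
      cases N with
      | nil => simp at hN
      | cons n0 N' =>
        simp only [wf, h, if_pos, List.cons_append, List.headD, List.tail]
        congr 1
        exact ih N' M O (by simp at hN; omega)
    · rw [List.countP_cons] at hN
      simp only [h] at hN
      simp only [wf, h, Bool.false_eq_true, if_neg, not_false_iff]
      congr 1
      exact ih N M O.tail (by simpa using hN)

-- the back-to-front loop with two stacks computes wf reversed
lemma foldB :
    ∀ (s out N O : List String),
    s.countP (fun x => is_num x) ≤ N.length →
    s.countP (fun x => !is_num x) ≤ O.length →
    (s.reverse).foldl wstep (out, N, O)
      = (out ++ (wf (N.drop (N.length - s.countP (fun x => is_num x)))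
                    (O.drop (O.length - s.countP (fun x => !is_num x))) s).reverse,
         N.take (N.length - s.countP (fun x => is_num x)),
         O.take (O.length - s.countP (fun x => !is_num x))) := by
  intro s
  induction s with
  | nil => intro out N O _ _; simp [wf]
  | cons x r ih =>
    intro out N O hN hO
    rw [List.reverse_cons, List.foldl_append, List.foldl_cons, List.foldl_nil]
    by_cases h : is_num x
    · have hcn : (x :: r).countP (fun x => is_num x) = r.countP (fun x => is_num x) + 1 := by
        rw [List.countP_cons]; simp [h]
      have hco : (x :: r).countP (fun x => !is_num x) = r.countP (fun x => !is_num x) := by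
        rw [List.countP_cons]; simp [h]
      rw [hcn] at hN; rw [hco] at hO ⊢
      rw [ih out N O (by omega) hO]
      set cn := r.countP (fun x => is_num x) with hcndef
      set co := r.countP (fun x => !is_num x) with hcodef
      have hm : N.length - cn = (N.length - (cn + 1)) + 1 := by omega
      have hlt : N.length - (cn + 1) < N.length := by omega
      have htake : N.take (N.length - cn)
          = N.take (N.length - (cn + 1)) ++ [N[N.length - (cn + 1)]] := by
        rw [hm, List.take_succ]
        simp [List.getElem?_eq_getElem hlt]
      have hpop : PySem.List.pop? (N.take (N.length - cn))
          = some (N[N.length - (cn + 1)], N.take (N.length - (cn + 1))) := by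
        rw [htake]; exact PySem.List.pop?_last _ _
      simp only [wstep, h, if_pos, hpop]
      rw [hcn]
      have hwf : wf (N.drop (N.length - (cn + 1))) (O.drop (O.length - co)) (x :: r)
          = N[N.length - (cn + 1)] :: wf (N.drop (N.length - cn)) (O.drop (O.length - co)) r := by
        simp only [wf, h, if_pos]
        congr 1
        · rw [List.headD_eq_head?_getD, List.head?_drop]
          simp [List.getElem?_eq_getElem hlt]
        · rw [List.tail_drop, hm]
      rw [hwf]
      simp [List.append_assoc]
    · have hcn : (x :: r).countP (fun x => is_num x) = r.countP (fun x => is_num x) := by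
        rw [List.countP_cons]; simp [h]
      have hco : (x :: r).countP (fun x => !is_num x) = r.countP (fun x => !is_num x) + 1 := by
        rw [List.countP_cons]; simp [h]
      rw [hco] at hO; rw [hcn] at hN ⊢
      rw [ih out N O hN (by omega)]
      set cn := r.countP (fun x => is_num x) with hcndef
      set co := r.countP (fun x => !is_num x) with hcodef
      have hm : O.length - co = (O.length - (co + 1)) + 1 := by omega
      have hlt : O.length - (co + 1) < O.length := by omega
      have htake : O.take (O.length - co)
          = O.take (O.length - (co + 1)) ++ [O[O.length - (co + 1)]] := by
        rw [hm, List.take_succ]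
        simp [List.getElem?_eq_getElem hlt]
      have hpop : PySem.List.pop? (O.take (O.length - co))
          = some (O[O.length - (co + 1)], O.take (O.length - (co + 1))) := by
        rw [htake]; exact PySem.List.pop?_last _ _
      simp only [wstep, h, Bool.false_eq_true, if_neg, not_false_iff, hpop]
      rw [hco]
      have hwf : wf (N.drop (N.length - cn)) (O.drop (O.length - (co + 1))) (x :: r)
          = O[O.length - (co + 1)] :: wf (N.drop (N.length - cn)) (O.drop (O.length - co)) r := by
        simp only [wf, h, Bool.false_eq_true, if_neg, not_false_iff]
        congr 1
        · rw [List.headD_eq_head?_getD, List.head?_drop]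
          simp [List.getElem?_eq_getElem hlt]
        · rw [List.tail_drop, hm]
      rw [hwf]
      simp [List.append_assoc]

-- counts of a predicate and its negation partition the length
lemma cn_add_co (s : List String) :
    s.countP (fun x => is_num x) + s.countP (fun x => !is_num x) = s.length := by
  induction s with
  | nil => simp
  | cons x r ih =>
    rw [List.countP_cons, List.countP_cons]
    by_cases h : is_num x <;> simp [h] <;> omega

-- ===== VERDICT (by name: the statement is the Claim_ definition above) =====
theorem string_sorted_spec : Claim_equal_string_sorted := by
  intro s _
  show string_sorted s = string_sorted_alt s
  simp only [string_sorted, string_sorted_alt]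
  show PySem.Str.join " " (((PySem.List.pyRange 0 (s.length : Int)).foldl
      (stepA (PySem.List.sorted s (fun x => x) false))
      (s, 0, s.countP (fun item => is_num item))).1)
    = PySem.Str.join " " (((s.reverse).foldl wstep ([],
        PySem.List.slice (PySem.List.sorted s (fun x => x) false) none
          (some (((s.map is_num).foldl (fun acc b => acc + (if b then 1 else 0)) 0 : Nat) : Int)),
        PySem.List.slice (PySem.List.sorted s (fun x => x) false)
          (some (((s.map is_num).foldl (fun acc b => acc + (if b then 1 else 0)) 0 : Nat) : Int)) none)).1.reverse)
  rw [ksum s 0, Nat.zero_add]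
  set t := PySem.List.sorted s (fun x => x) false with ht
  set cn := s.countP (fun x => is_num x) with hcn
  set co := s.countP (fun x => !is_num x) with hco
  have htlen : t.length = s.length := PySem.List.length_sorted s _ _
  have hcn_le : cn ≤ s.length := List.countP_le_length
  have hsum : cn + co = s.length := cn_add_co s
  rw [pyRange_eq_map, mainA, PySem.List.slice_to_natCast, PySem.List.slice_from_natCast]
  have hNlen : (t.take cn).length = cn := by
    rw [List.length_take]; omega
  have hOlen : (t.drop cn).length = co := by
    rw [List.length_drop]; omega
  rw [foldB s [] (t.take cn) (t.drop cn) (by omega) (by omega)]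
  rw [← hcn, ← hco]
  simp only [hNlen, hOlen, Nat.sub_self, List.drop_zero, List.nil_append, List.reverse_reverse]
  have hext : wf (t.take cn ++ t.drop cn) (t.drop cn) s = wf (t.take cn) (t.drop cn) s :=
    wf_extend s (t.take cn) (t.drop cn) (t.drop cn) (by omega)
  rw [List.take_append_drop] at hext
  rw [← hext, gbuild_eq_wf t s 0 cn, List.drop_zero]
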